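-- pv_equiv track=rewrite | github.com/was1a1fairy/arrays_project | arrays_lib.py | upper_triangle
-- ===== SOURCE A (Python) =====
-- def upper_triangle(matrix):
--     new = []
--
--     for i in range(len(matrix)):
--         row = []
--         for j in range(len(matrix[i])):
--
--             if j >= i:
--                 row.append(matrix[i][j])
--             else:
--                 row.append(0)
--
--         new.append(row)
--
--     return new
-- ===== SOURCE B (Python) =====
-- def upper_triangle(matrix):
--     return [[0] * min(i, len(row)) + list(row[i:])
--             for i, row in enumerate(matrix)]
-- ===== Notes on version B (the rewrite author's own statement) =====
-- stated objective: simpler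
-- what changed: Replaces the inner per-cell column loop with a per-row closed form: prepend min(i, len(row)) zeros and append the slice row[i:], built in a single list comprehension over enumerate(matrix).
import Mathlib
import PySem

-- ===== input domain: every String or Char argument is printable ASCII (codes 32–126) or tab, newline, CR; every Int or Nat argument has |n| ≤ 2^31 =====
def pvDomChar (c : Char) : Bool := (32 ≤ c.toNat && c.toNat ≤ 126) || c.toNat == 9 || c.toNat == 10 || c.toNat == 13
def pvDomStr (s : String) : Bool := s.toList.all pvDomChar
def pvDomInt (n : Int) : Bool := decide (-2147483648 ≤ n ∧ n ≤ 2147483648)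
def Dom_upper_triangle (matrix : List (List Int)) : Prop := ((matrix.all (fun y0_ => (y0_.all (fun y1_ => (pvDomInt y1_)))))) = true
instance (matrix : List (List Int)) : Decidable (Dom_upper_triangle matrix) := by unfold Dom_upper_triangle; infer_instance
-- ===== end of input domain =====

-- B replaces the per-cell inner loop and branch with a per-row closed form
-- (min(i, len(row)) zeros ++ row[i:]); objective: simpler. Total, no Pre_.

-- ===== PORT A =====
def upper_triangle (matrix : List (List Int)) : List (List Int) :=
  (PySem.List.pyRange 0 matrix.length 1).foldl (fun new i =>
    let mi := PySem.List.pyGetD matrix i []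
    let row := (PySem.List.pyRange 0 mi.length 1).foldl (fun row j =>
      if j ≥ i then row ++ [PySem.List.pyGetD mi j 0] else row ++ [(0 : Int)]) []
    new ++ [row]) []

-- ===== PORT B =====
def upper_triangle_alt (matrix : List (List Int)) : List (List Int) :=
  (PySem.List.enumerate matrix).map (fun p =>
    List.replicate (min p.1.toNat p.2.length) (0 : Int) ++ PySem.List.slice p.2 (some p.1) none)

-- ===== PRECONDITION & SPEC =====
def Spec_upper_triangle (matrix : List (List Int)) (out : List (List Int)) : Prop := out = upper_triangle_alt matrix
instance (matrix : List (List Int)) (out : List (List Int)) : Decidable (Spec_upper_triangle matrix out) := by unfold Spec_upper_triangle; infer_instance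

-- ===== CLAIM (what is proved, stated in full; the proofs are below) =====
def Claim_equal_upper_triangle : Prop := ∀ (matrix : List (List Int)), Dom_upper_triangle matrix → Spec_upper_triangle matrix (upper_triangle matrix)

-- ===== LEMMAS AND PROOFS =====

-- (enumerate xs s)[k] = (s + k, xs[k]) : index form of Python's enumerate
lemma inner_row_eq (i : Nat) (mi : List Int) :
    (PySem.List.pyRange 0 mi.length 1).foldl (fun row j =>
      if j ≥ (i : Int) then row ++ [PySem.List.pyGetD mi j 0] else row ++ [(0 : Int)]) [] =
    List.replicate (min i mi.length) 0 ++ mi.drop i := by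
  have h1 : (fun (row : List Int) (j : Int) =>
      if j ≥ (i : Int) then row ++ [PySem.List.pyGetD mi j 0] else row ++ [(0 : Int)]) =
      fun row j => row ++ [if (i : Int) ≤ j then PySem.List.pyGetD mi j 0 else 0] := by
    funext row j; split <;> simp_all
  rw [h1, PySem.List.foldl_append_singleton_eq_map, PySem.List.pyRange_zero_nat,
    List.map_map, List.nil_append]
  apply List.ext_getElem
  · simp only [List.length_map, List.length_range, List.length_append,
      List.length_replicate, List.length_drop]
    omega
  intro k hk hk'
  rw [List.length_map, List.length_range] at hk
  simp only [List.getElem_map, List.getElem_range, Function.comp]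
  rw [PySem.List.pyGetD_natCast]
  by_cases hik : i ≤ k
  · rw [if_pos (by exact_mod_cast hik)]
    have hmin : min i mi.length ≤ k := by omega
    rw [List.getElem_append_right (by simpa using hmin)]
    simp only [List.length_replicate, List.getElem_drop]
    rw [List.getD_eq_getElem _ _ hk]
    congr 1
    omega
  · rw [if_neg (by exact_mod_cast hik)]
    rw [List.getElem_append_left (by simp; omega)]
    simp

lemma enumerate_getElem {α : Type} (xs : List α) (s : Int) (k : Nat) (hk : k < xs.length)
    (hk' : k < (PySem.List.enumerate xs s).length) :
    (PySem.List.enumerate xs s)[k] = (s + k, xs[k]) := by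
  induction xs generalizing s k with
  | nil => simp at hk
  | cons x xs ih =>
    simp only [PySem.List.enumerate_cons]
    cases k with
    | zero => simp
    | succ k =>
      simp only [List.getElem_cons_succ]
      rw [ih (s + 1) k (by simpa using hk) (by simpa [PySem.List.length_enumerate] using hk)]
      simp; ring_nf

lemma outer_eq (matrix : List (List Int)) :
    upper_triangle matrix = upper_triangle_alt matrix := by
  unfold upper_triangle upper_triangle_alt
  show (PySem.List.pyRange 0 matrix.length 1).foldl (fun new i =>
      let mi := PySem.List.pyGetD matrix i []
      let row := (PySem.List.pyRange 0 mi.length 1).foldl (fun row j =>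
        if j ≥ i then row ++ [PySem.List.pyGetD mi j 0] else row ++ [(0 : Int)]) []
      new ++ [row]) [] =
    (PySem.List.enumerate matrix).map (fun p =>
      List.replicate (min p.1.toNat p.2.length) (0 : Int) ++ PySem.List.slice p.2 (some p.1) none)
  rw [show (fun (new : List (List Int)) (i : Int) =>
      let mi := PySem.List.pyGetD matrix i []
      let row := (PySem.List.pyRange 0 mi.length 1).foldl (fun row j =>
        if j ≥ i then row ++ [PySem.List.pyGetD mi j 0] else row ++ [(0 : Int)]) []
      new ++ [row]) = fun new i => new ++ [(PySem.List.pyRange 0 (PySem.List.pyGetD matrix i []).length 1).foldl (fun row j =>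
        if j ≥ i then row ++ [PySem.List.pyGetD (PySem.List.pyGetD matrix i []) j 0] else row ++ [(0 : Int)]) []] from rfl]
  rw [PySem.List.foldl_append_singleton_eq_map, PySem.List.pyRange_zero_nat, List.map_map, List.nil_append]
  apply List.ext_getElem
  · simp [PySem.List.length_enumerate]
  intro k hk1 hk2
  rw [List.length_map, List.length_range] at hk1
  simp only [List.getElem_map, List.getElem_range, Function.comp]
  rw [enumerate_getElem matrix 0 k hk1 (by rwa [PySem.List.length_enumerate])]
  have hget : PySem.List.pyGetD matrix (k : Int) [] = matrix[k] := by
    rw [PySem.List.pyGetD_natCast, List.getD_eq_getElem _ _ hk1]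
  rw [hget]
  simp only [Int.zero_add]
  rw [inner_row_eq k matrix[k], PySem.List.slice_from_natCast, Int.toNat_natCast]

-- ===== VERDICT (by name: the statement is the Claim_ definition above) =====
theorem upper_triangle_spec : Claim_equal_upper_triangle := by
  intro matrix _
  unfold Spec_upper_triangle
  exact outer_eq matrix
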